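-- pv_equiv track=rewrite | github.com/Ivan-Klabucar/Programming-Language-Translation | lab3/HelperFunctions.py | tilda
-- ===== SOURCE A (Python) =====
-- def is_const(type): # Samo je li vanjski const
--     retb = False
--     retv = None
--     elems = type.split('(')
--     if elems[0] == 'const':
--         retb = True
--         retv = type[6:-1]
--     return retb, retv
--
-- def is_T(type):
--     return type in ['int','char']
--
-- def is_X(type):
--     return is_T(type) or is_T(is_const(type)[1])
--
-- def is_seq(type):
--     retb = False
--     retv = None
--     elems = type.split('(')
--     if elems[0] == 'niz':
--         retb = True
--         retv = type[4:-1]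
--     return retb, retv
--
-- def tilda(type1, type2): # returns type1 ~ type2, needs implementing, has to support calls like tilda('int', 'T')
--     if type2 == 'T':
--         return is_T(type1)
--     if type2 == 'X':
--         return is_X(type1)
--     if type1 == type2:
--         return True
--     elif type1 == 'char' and type2 == 'int':
--         return True
--     elif is_const(type1)[0]:
--         return tilda(is_const(type1)[1], type2)
--     elif is_const(type2)[0]:
--         return tilda(type1, is_const(type2)[1])
--     elif is_seq(type1)[0] and not is_const(is_seq(type1)[1])[0] and is_seq(type2)[0] and not is_const(is_seq(type2)[1])[0]:
--         return tilda(is_seq(type1)[1], is_seq(type2)[1])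
--     elif is_seq(type1)[0] and not is_const(is_seq(type1)[1])[0] and is_seq(type2)[0] and is_const(is_seq(type2)[1])[0]:
--         return tilda(is_seq(type1)[1], is_const(is_seq(type2)[1])[1])
--     elif is_seq(type1)[0] and is_const(is_seq(type1)[1])[0] and is_seq(type2)[0] and is_const(is_seq(type2)[1])[0]:
--         return tilda(is_const(is_seq(type1)[1])[1], is_const(is_seq(type2)[1])[1])
--     return False
-- ===== SOURCE B (Python) =====
-- def _parse(s):
--     head = s.split('(')[0]
--     if head == 'const':
--         return ('const', s, _parse(s[6:-1]))
--     if head == 'niz':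
--         return ('niz', s, _parse(s[4:-1]))
--     return ('leaf', s)
--
-- def _cmp(t1, t2):
--     if t2[1] == 'T':
--         return t1[1] in ('int', 'char')
--     if t2[1] == 'X':
--         return t1[1] in ('int', 'char') or (t1[0] == 'const' and t1[2][1] in ('int', 'char'))
--     if t1[1] == t2[1]:
--         return True
--     if t1[1] == 'char' and t2[1] == 'int':
--         return True
--     if t1[0] == 'const':
--         return _cmp(t1[2], t2)
--     if t2[0] == 'const':
--         return _cmp(t1, t2[2])
--     if t1[0] == 'niz' and t2[0] == 'niz':
--         a, b = t1[2], t2[2]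
--         if a[0] == 'const' and b[0] == 'const':
--             return _cmp(a[2], b[2])
--         if a[0] == 'const':
--             return False
--         if b[0] == 'const':
--             return _cmp(a, b[2])
--         return _cmp(a, b)
--     return False
--
-- def tilda(type1, type2):
--     return _cmp(_parse(type1), _parse(type2))
-- ===== Notes on version B (the rewrite author's own statement) =====
-- stated objective: alternative
-- what changed: B parses each type string once into a nested AST (leaf/const/niz nodes, each keeping its raw string) and decides compatibility by a recursive walk over the two trees, instead of A's re-splitting and re-slicing of the strings with is_const/is_seq at every step of the recursion.
import Mathlib
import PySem

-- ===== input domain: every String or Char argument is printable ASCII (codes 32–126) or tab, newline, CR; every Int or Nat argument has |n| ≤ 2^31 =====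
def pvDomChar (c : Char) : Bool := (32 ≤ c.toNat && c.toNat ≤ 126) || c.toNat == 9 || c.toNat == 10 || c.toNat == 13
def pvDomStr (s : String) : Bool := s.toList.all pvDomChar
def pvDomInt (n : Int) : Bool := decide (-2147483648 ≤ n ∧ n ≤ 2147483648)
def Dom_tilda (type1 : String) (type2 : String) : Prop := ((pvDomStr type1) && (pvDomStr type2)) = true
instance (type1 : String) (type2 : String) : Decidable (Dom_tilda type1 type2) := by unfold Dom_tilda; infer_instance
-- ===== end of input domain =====

-- B parses each type string ONCE into a tree and compares the trees, instead of A's re-splitting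
-- of the strings at every recursive step; objective: alternative/simpler structure, same results.

-- ===== PORT A =====

-- A: is_const — flag and, when the first '('-piece is 'const', the string type[6:-1]
def isConst (t : String) : Bool × Option String :=
  let elems := (PySem.Str.split? t "(").getD []
  if ((PySem.List.pyGet? elems 0).getD "") == "const" then
    (true, some (PySem.Str.slice t (some 6) (some (-1))))
  else (false, none)

-- A: is_seq
def isSeq (t : String) : Bool × Option String :=
  let elems := (PySem.Str.split? t "(").getD []
  if ((PySem.List.pyGet? elems 0).getD "") == "niz" then
    (true, some (PySem.Str.slice t (some 4) (some (-1))))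
  else (false, none)

-- A: is_T
def isT (t : String) : Bool := t == "int" || t == "char"

-- Python is_T(None) is False; is_T applied to the Optional second component
def isTOpt : Option String → Bool
  | some v => isT v
  | none => false

-- A: is_X
def isX (t : String) : Bool := isT t || isTOpt (isConst t).2

-- termination helpers for the ports (cited by decreasing_by)
lemma slice_len_lt (t : String) (h : t.toList ≠ []) (a : Int) :
    (PySem.Str.slice t (some a) (some (-1))).toList.length < t.toList.length := by
  simp only [pysem]
  have h1 : 0 < t.toList.length := List.length_pos_iff.mpr h
  omega

lemma stripConst_len_lt {t : String} (h : (isConst t).1 = true) :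
    ((isConst t).2.getD "").toList.length < t.toList.length := by
  unfold isConst at h ⊢
  dsimp only at h ⊢
  split at h
  · next hc =>
    rw [if_pos hc]
    simp only [Option.getD_some]
    apply slice_len_lt
    intro he
    have ht : t = "" := String.toList_eq_nil_iff.mp he
    subst ht
    exact absurd hc (by decide)
  · simp at h

lemma stripSeq_len_lt {t : String} (h : (isSeq t).1 = true) :
    ((isSeq t).2.getD "").toList.length < t.toList.length := by
  unfold isSeq at h ⊢
  dsimp only at h ⊢
  split at h
  · next hc =>
    rw [if_pos hc]
    simp only [Option.getD_some]
    apply slice_len_lt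
    intro he
    have ht : t = "" := String.toList_eq_nil_iff.mp he
    subst ht
    exact absurd hc (by decide)
  · simp at h

-- A: tilda (literal transliteration; elif chain as dependent ifs)
def tilda (type1 : String) (type2 : String) : Bool :=
  if type2 == "T" then isT type1
  else if type2 == "X" then isX type1
  else if type1 == type2 then true
  else if type1 == "char" && type2 == "int" then true
  else if h5 : (isConst type1).1 then tilda ((isConst type1).2.getD "") type2
  else if h6 : (isConst type2).1 then tilda type1 ((isConst type2).2.getD "")
  else if h7 : (isSeq type1).1 && !(isConst ((isSeq type1).2.getD "")).1
            && (isSeq type2).1 && !(isConst ((isSeq type2).2.getD "")).1 then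
    tilda ((isSeq type1).2.getD "") ((isSeq type2).2.getD "")
  else if h8 : (isSeq type1).1 && !(isConst ((isSeq type1).2.getD "")).1
            && (isSeq type2).1 && (isConst ((isSeq type2).2.getD "")).1 then
    tilda ((isSeq type1).2.getD "") ((isConst ((isSeq type2).2.getD "")).2.getD "")
  else if h9 : (isSeq type1).1 && (isConst ((isSeq type1).2.getD "")).1
            && (isSeq type2).1 && (isConst ((isSeq type2).2.getD "")).1 then
    tilda ((isConst ((isSeq type1).2.getD "")).2.getD "") ((isConst ((isSeq type2).2.getD "")).2.getD "")
  else false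
termination_by type1.toList.length + type2.toList.length
decreasing_by
  · have := stripConst_len_lt h5; omega
  · have := stripConst_len_lt h6; omega
  · simp only [Bool.and_eq_true] at h7
    have h1 := stripSeq_len_lt h7.1.1.1
    have h2 := stripSeq_len_lt h7.1.2
    omega
  · simp only [Bool.and_eq_true] at h8
    have h1 := stripSeq_len_lt h8.1.1.1
    have h2 := stripSeq_len_lt h8.1.2
    have h3 := stripConst_len_lt h8.2
    omega
  · simp only [Bool.and_eq_true] at h9
    have h1 := stripSeq_len_lt h9.1.1.1
    have h2 := stripSeq_len_lt h9.1.2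
    have h3 := stripConst_len_lt h9.1.1.2
    have h4 := stripConst_len_lt h9.2
    omega

-- ===== PORT B =====

-- B's AST: each node keeps the raw string it was parsed from
inductive Ty
  | leaf : String → Ty
  | cnst : String → Ty → Ty
  | niz  : String → Ty → Ty
deriving DecidableEq, Repr

def Ty.raw : Ty → String
  | .leaf s => s
  | .cnst s _ => s
  | .niz s _ => s

-- B: _parse — s.split('(')[0] decides the head, children are parsed once
def parse (s : String) : Ty :=
  if h1 : ((PySem.List.pyGet? ((PySem.Str.split? s "(").getD []) 0).getD "") == "const" then
    Ty.cnst s (parse (PySem.Str.slice s (some 6) (some (-1))))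
  else if h2 : ((PySem.List.pyGet? ((PySem.Str.split? s "(").getD []) 0).getD "") == "niz" then
    Ty.niz s (parse (PySem.Str.slice s (some 4) (some (-1))))
  else Ty.leaf s
termination_by s.toList.length
decreasing_by
  · have : (isConst s).1 = true := by unfold isConst; simp [h1]
    have h := stripConst_len_lt this
    have : (isConst s).2.getD "" = PySem.Str.slice s (some 6) (some (-1)) := by
      unfold isConst; simp [h1]
    rwa [this] at h
  · have : (isSeq s).1 = true := by unfold isSeq; simp [h2]
    have h := stripSeq_len_lt this
    have : (isSeq s).2.getD "" = PySem.Str.slice s (some 4) (some (-1)) := by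
      unfold isSeq; simp [h2]
    rwa [this] at h

-- B: _cmp — walks the two trees
def tcmp (t1 : Ty) (t2 : Ty) : Bool :=
  if t2.raw == "T" then t1.raw == "int" || t1.raw == "char"
  else if t2.raw == "X" then
    (t1.raw == "int" || t1.raw == "char")
    || (match t1 with
        | Ty.cnst _ c => c.raw == "int" || c.raw == "char"
        | _ => false)
  else if t1.raw == t2.raw then true
  else if t1.raw == "char" && t2.raw == "int" then true
  else match t1, t2 with
    | Ty.cnst _ a, u2 => tcmp a u2
    | u1, Ty.cnst _ b => tcmp u1 b
    | Ty.niz _ a, Ty.niz _ b =>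
      (match a, b with
       | Ty.cnst _ a', Ty.cnst _ b' => tcmp a' b'
       | Ty.cnst _ _, _ => false
       | u, Ty.cnst _ b' => tcmp u b'
       | u, v => tcmp u v)
    | _, _ => false
termination_by sizeOf t1 + sizeOf t2

def tilda_alt (type1 : String) (type2 : String) : Bool :=
  tcmp (parse type1) (parse type2)

-- ===== PRECONDITION & SPEC =====
def Spec_tilda (type1 : String) (type2 : String) (out : Bool) : Prop := out = tilda_alt type1 type2
instance (type1 : String) (type2 : String) (out : Bool) : Decidable (Spec_tilda type1 type2 out) := by unfold Spec_tilda; infer_instance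

-- ===== CLAIM (what is proved, stated in full; the proofs are below) =====
def Claim_equal_tilda : Prop := ∀ (type1 : String) (type2 : String), Dom_tilda type1 type2 → Spec_tilda type1 type2 (tilda type1 type2)

-- ===== LEMMAS AND PROOFS =====

-- the first '('-piece of s, shared scrutinee of both ports' head tests
def hd (s : String) : String :=
  (PySem.List.pyGet? ((PySem.Str.split? s "(").getD []) 0).getD ""

lemma isConst_fst_iff (t : String) : (isConst t).1 = true ↔ (hd t == "const") = true := by
  unfold isConst hd
  dsimp only
  split <;> simp_all

lemma isSeq_fst_iff (t : String) : (isSeq t).1 = true ↔ (hd t == "niz") = true := by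
  unfold isSeq hd
  dsimp only
  split <;> simp_all

lemma isConst_eq_true {t : String} (h : (hd t == "const") = true) :
    isConst t = (true, some (PySem.Str.slice t (some 6) (some (-1)))) := by
  unfold hd at h
  unfold isConst
  dsimp only
  rw [if_pos h]

lemma isConst_eq_false {t : String} (h : (hd t == "const") = false) :
    isConst t = (false, none) := by
  unfold hd at h
  unfold isConst
  dsimp only
  rw [if_neg (by simp [h])]

lemma isSeq_eq_true {t : String} (h : (hd t == "niz") = true) :
    isSeq t = (true, some (PySem.Str.slice t (some 4) (some (-1)))) := by
  unfold hd at h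
  unfold isSeq
  dsimp only
  rw [if_pos h]

lemma parse_cnst {s : String} (h : (hd s == "const") = true) :
    parse s = Ty.cnst s (parse (PySem.Str.slice s (some 6) (some (-1)))) := by
  unfold hd at h
  rw [parse]
  rw [dif_pos h]

lemma parse_niz {s : String} (hc : (hd s == "const") = false) (h : (hd s == "niz") = true) :
    parse s = Ty.niz s (parse (PySem.Str.slice s (some 4) (some (-1)))) := by
  unfold hd at hc h
  rw [parse]
  rw [dif_neg (by simp [hc]), dif_pos h]

lemma parse_leaf {s : String} (hc : (hd s == "const") = false) (hn : (hd s == "niz") = false) :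
    parse s = Ty.leaf s := by
  unfold hd at hc hn
  rw [parse]
  rw [dif_neg (by simp [hc]), dif_neg (by simp [hn])]

lemma raw_parse (s : String) : (parse s).raw = s := by
  rw [parse]
  split
  · rfl
  split <;> rfl

lemma tilda_eq_tcmp (n : Nat) : ∀ t1 t2 : String,
    t1.toList.length + t2.toList.length ≤ n → tilda t1 t2 = tcmp (parse t1) (parse t2) := by
  induction n using Nat.strong_induction_on with
  | _ n ih =>
  intro t1 t2 hlen
  rw [tilda, tcmp.eq_def]
  simp only [raw_parse]
  by_cases c1 : (t2 == "T") = true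
  · -- type2 == 'T'
    rw [if_pos c1, if_pos c1]
    rfl
  rw [if_neg c1, if_neg c1]
  by_cases c2 : (t2 == "X") = true
  · -- type2 == 'X'
    rw [if_pos c2, if_pos c2]
    unfold isX isT isTOpt
    by_cases hc : (hd t1 == "const") = true
    · rw [isConst_eq_true hc, parse_cnst hc]
      simp [raw_parse, isT]
    · simp only [Bool.not_eq_true] at hc
      rw [isConst_eq_false hc]
      by_cases hn : (hd t1 == "niz") = true
      · rw [parse_niz hc hn]
      · simp only [Bool.not_eq_true] at hn
        rw [parse_leaf hc hn]
  rw [if_neg c2, if_neg c2]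
  by_cases c3 : (t1 == t2) = true
  · rw [if_pos c3, if_pos c3]
  rw [if_neg c3, if_neg c3]
  by_cases c4 : (t1 == "char" && t2 == "int") = true
  · rw [if_pos c4, if_pos c4]
  rw [if_neg c4, if_neg c4]
  by_cases c5 : (isConst t1).1 = true
  · -- strip const from type1
    have hc1 := (isConst_fst_iff t1).mp c5
    rw [dif_pos c5, parse_cnst hc1]
    rw [isConst_eq_true hc1]
    simp only [Option.getD_some]
    have hlt := stripConst_len_lt c5
    rw [isConst_eq_true hc1] at hlt
    simp only [Option.getD_some] at hlt
    exact ih _ (by omega) _ _ le_rfl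
  rw [dif_neg c5]
  simp only [Bool.not_eq_true] at c5
  have hc1 : (hd t1 == "const") = false := by
    by_contra hx
    simp only [Bool.not_eq_false] at hx
    rw [(isConst_fst_iff t1).mpr hx] at c5
    exact absurd c5 (by simp)
  by_cases c6 : (isConst t2).1 = true
  · -- strip const from type2
    have hc2 := (isConst_fst_iff t2).mp c6
    rw [dif_pos c6, parse_cnst hc2]
    rw [isConst_eq_true hc2]
    simp only [Option.getD_some]
    have hlt := stripConst_len_lt c6
    rw [isConst_eq_true hc2] at hlt
    simp only [Option.getD_some] at hlt
    have key := ih _ (by omega : t1.toList.length + (PySem.Str.slice t2 (some 6) (some (-1))).toList.length < n) t1 _ le_rfl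
    -- reduce the match: parse t1 is not a const node
    by_cases hn : (hd t1 == "niz") = true
    · rw [parse_niz hc1 hn] at key ⊢
      exact key
    · simp only [Bool.not_eq_true] at hn
      rw [parse_leaf hc1 hn] at key ⊢
      exact key
  rw [dif_neg c6]
  simp only [Bool.not_eq_true] at c6
  have hc2 : (hd t2 == "const") = false := by
    by_contra hx
    simp only [Bool.not_eq_false] at hx
    rw [(isConst_fst_iff t2).mpr hx] at c6
    exact absurd c6 (by simp)
  -- now neither side is const-headed; case on niz-headedness
  by_cases hn1 : (hd t1 == "niz") = true
  case neg =>
    -- type1 is a plain leaf: every remaining branch of A is False, and so is B's match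
    simp only [Bool.not_eq_true] at hn1
    have hs1 : (isSeq t1).1 = false := by
      by_contra hx
      simp only [Bool.not_eq_false] at hx
      rw [(isSeq_fst_iff t1).mp hx] at hn1
      exact absurd hn1 (by simp)
    rw [parse_leaf hc1 hn1]
    rw [dif_neg (by simp [hs1]), dif_neg (by simp [hs1]), dif_neg (by simp [hs1])]
    by_cases hn2 : (hd t2 == "niz") = true
    · rw [parse_niz hc2 hn2]
    · simp only [Bool.not_eq_true] at hn2
      rw [parse_leaf hc2 hn2]
  case pos =>
  rw [parse_niz hc1 hn1]
  have hs1 : (isSeq t1).1 = true := (isSeq_fst_iff t1).mpr hn1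
  by_cases hn2 : (hd t2 == "niz") = true
  case neg =>
    -- type2 is a plain leaf
    simp only [Bool.not_eq_true] at hn2
    have hs2 : (isSeq t2).1 = false := by
      by_contra hx
      simp only [Bool.not_eq_false] at hx
      rw [(isSeq_fst_iff t2).mp hx] at hn2
      exact absurd hn2 (by simp)
    rw [parse_leaf hc2 hn2]
    rw [dif_neg (by simp [hs2]), dif_neg (by simp [hs2]), dif_neg (by simp [hs2])]
  case pos =>
  rw [parse_niz hc2 hn2]
  have hs2 : (isSeq t2).1 = true := (isSeq_fst_iff t2).mpr hn2
  have e1 : (isSeq t1).2.getD "" = PySem.Str.slice t1 (some 4) (some (-1)) := by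
    rw [isSeq_eq_true hn1]; rfl
  have e2 : (isSeq t2).2.getD "" = PySem.Str.slice t2 (some 4) (some (-1)) := by
    rw [isSeq_eq_true hn2]; rfl
  have hlt1 := stripSeq_len_lt hs1
  have hlt2 := stripSeq_len_lt hs2
  rw [e1] at hlt1
  rw [e2] at hlt2
  -- shapes of the niz children
  by_cases ka : (hd (PySem.Str.slice t1 (some 4) (some (-1))) == "const") = true
  all_goals by_cases kb : (hd (PySem.Str.slice t2 (some 4) (some (-1))) == "const") = true
  · -- both children const: A's third niz branch
    have ca : (isConst ((isSeq t1).2.getD "")).1 = true := by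
      rw [e1]; exact (isConst_fst_iff _).mpr ka
    have cb : (isConst ((isSeq t2).2.getD "")).1 = true := by
      rw [e2]; exact (isConst_fst_iff _).mpr kb
    rw [dif_neg (by simp [hs1, hs2, ca]), dif_neg (by simp [hs1, hs2, ca]),
        dif_pos (by simp [hs1, hs2, ca, cb])]
    rw [parse_cnst ka, parse_cnst kb]
    rw [e1, e2, isConst_eq_true ka, isConst_eq_true kb]
    simp only [Option.getD_some]
    have hlt3 := stripConst_len_lt ((isConst_fst_iff _).mpr ka)
    have hlt4 := stripConst_len_lt ((isConst_fst_iff _).mpr kb)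
    rw [isConst_eq_true ka] at hlt3
    rw [isConst_eq_true kb] at hlt4
    simp only [Option.getD_some] at hlt3 hlt4
    exact ih _ (by omega) _ _ le_rfl
  · -- child1 const, child2 not: A falls through to False
    simp only [Bool.not_eq_true] at kb
    have ca : (isConst ((isSeq t1).2.getD "")).1 = true := by
      rw [e1]; exact (isConst_fst_iff _).mpr ka
    have cb : (isConst ((isSeq t2).2.getD "")).1 = false := by
      rw [e2]
      by_contra hx
      simp only [Bool.not_eq_false] at hx
      rw [(isConst_fst_iff _).mp hx] at kb
      exact absurd kb (by simp)
    rw [dif_neg (by simp [ca]), dif_neg (by simp [ca]), dif_neg (by simp [cb])]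
    rw [parse_cnst ka]
    by_cases kb2 : (hd (PySem.Str.slice t2 (some 4) (some (-1))) == "niz") = true
    · rw [parse_niz kb kb2]
    · simp only [Bool.not_eq_true] at kb2
      rw [parse_leaf kb kb2]
  · -- child1 not const, child2 const: A's second niz branch
    simp only [Bool.not_eq_true] at ka
    have ca : (isConst ((isSeq t1).2.getD "")).1 = false := by
      rw [e1]
      by_contra hx
      simp only [Bool.not_eq_false] at hx
      rw [(isConst_fst_iff _).mp hx] at ka
      exact absurd ka (by simp)
    have cb : (isConst ((isSeq t2).2.getD "")).1 = true := by
      rw [e2]; exact (isConst_fst_iff _).mpr kb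
    rw [dif_neg (by simp [cb]), dif_pos (by simp [hs1, hs2, ca, cb])]
    rw [parse_cnst kb]
    rw [e1, e2, isConst_eq_true kb]
    simp only [Option.getD_some]
    have hlt4 := stripConst_len_lt cb
    rw [e2, isConst_eq_true kb] at hlt4
    simp only [Option.getD_some] at hlt4
    have key := ih _ (by omega : (PySem.Str.slice t1 (some 4) (some (-1))).toList.length + (PySem.Str.slice (PySem.Str.slice t2 (some 4) (some (-1))) (some 6) (some (-1))).toList.length < n) _ _ le_rfl
    by_cases ka2 : (hd (PySem.Str.slice t1 (some 4) (some (-1))) == "niz") = true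
    · rw [parse_niz ka ka2] at key ⊢
      exact key
    · simp only [Bool.not_eq_true] at ka2
      rw [parse_leaf ka ka2] at key ⊢
      exact key
  · -- neither child const: A's first niz branch
    simp only [Bool.not_eq_true] at ka kb
    have ca : (isConst ((isSeq t1).2.getD "")).1 = false := by
      rw [e1]
      by_contra hx
      simp only [Bool.not_eq_false] at hx
      rw [(isConst_fst_iff _).mp hx] at ka
      exact absurd ka (by simp)
    have cb : (isConst ((isSeq t2).2.getD "")).1 = false := by
      rw [e2]
      by_contra hx
      simp only [Bool.not_eq_false] at hx
      rw [(isConst_fst_iff _).mp hx] at kb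
      exact absurd kb (by simp)
    rw [dif_pos (by simp [hs1, hs2, ca, cb])]
    rw [e1, e2]
    have key := ih _ (by omega : (PySem.Str.slice t1 (some 4) (some (-1))).toList.length + (PySem.Str.slice t2 (some 4) (some (-1))).toList.length < n) _ _ le_rfl
    by_cases ka2 : (hd (PySem.Str.slice t1 (some 4) (some (-1))) == "niz") = true
    all_goals by_cases kb2 : (hd (PySem.Str.slice t2 (some 4) (some (-1))) == "niz") = true
    · rw [parse_niz ka ka2, parse_niz kb kb2] at key ⊢; exact key
    · simp only [Bool.not_eq_true] at kb2
      rw [parse_niz ka ka2, parse_leaf kb kb2] at key ⊢; exact key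
    · simp only [Bool.not_eq_true] at ka2
      rw [parse_leaf ka ka2, parse_niz kb kb2] at key ⊢; exact key
    · simp only [Bool.not_eq_true] at ka2 kb2
      rw [parse_leaf ka ka2, parse_leaf kb kb2] at key ⊢; exact key

-- ===== VERDICT (by name: the statement is the Claim_ definition above) =====
theorem tilda_spec : Claim_equal_tilda := by
  intro t1 t2 _
  unfold Spec_tilda tilda_alt
  exact tilda_eq_tcmp (t1.toList.length + t2.toList.length) t1 t2 le_rfl
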